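-- pv_equiv track=rewrite | github.com/vishalbk/mvt-trilogy | cdk/lib/handlers/auth/rbac/index.py | check_permission
-- ===== SOURCE A (Python) =====
-- ROLE_HIERARCHY = {
--     'viewer': 0,
--     'analyst': 1,
--     'admin': 2,
-- }
--
-- ENDPOINT_PERMISSIONS = {
--     # Public endpoints (no auth required — handled outside this authorizer)
--     # Auth endpoints
--     'POST /auth/*': 'viewer',
--
--     # Read-only endpoints (viewer+)
--     'GET /preferences': 'viewer',
--     'GET /history/*': 'viewer',
--     'GET /health': 'viewer',
--     'GET /dashboard/*': 'viewer',
--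
--     # Write endpoints (analyst+)
--     'PUT /preferences': 'analyst',
--     'POST /watchlists': 'analyst',
--     'PUT /watchlists/*': 'analyst',
--     'DELETE /watchlists/*': 'analyst',
--
--     # Admin endpoints
--     'GET /admin/*': 'admin',
--     'PUT /admin/*': 'admin',
--     'POST /admin/*': 'admin',
--     'GET /audit/*': 'admin',
--     'PUT /users/*/role': 'admin',
--     'DELETE /users/*': 'admin',
-- }
--
-- def check_permission(role, method, resource):
--     """Check if role has permission for the given endpoint."""
--     endpoint_key = f"{method} {resource}"
--
--     # Check exact match first
--     if endpoint_key in ENDPOINT_PERMISSIONS: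
--         required_role = ENDPOINT_PERMISSIONS[endpoint_key]
--         return ROLE_HIERARCHY.get(role, 0) >= ROLE_HIERARCHY.get(required_role, 0)
--
--     # Check wildcard patterns
--     for pattern, required_role in ENDPOINT_PERMISSIONS.items():
--         pattern_method, pattern_path = pattern.split(' ', 1)
--         if pattern_method != method and pattern_method != '*':
--             continue
--
--         if pattern_path.endswith('/*'):
--             prefix = pattern_path[:-2]
--             if resource.startswith(prefix):
--                 return ROLE_HIERARCHY.get(role, 0) >= ROLE_HIERARCHY.get(required_role, 0)
--
--     # Default: allow for authenticated users
--     return True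
-- ===== SOURCE B (Python) =====
-- _RANK = {'viewer': 0, 'analyst': 1, 'admin': 2}
--
-- # Permission rules re-grouped by HTTP method: per method an exact-resource table
-- # and an ordered list of (path_prefix, role) wildcard rules (table order kept).
-- _RULES = {
--     'GET': ({'/preferences': 'viewer', '/health': 'viewer'},
--             [('/history', 'viewer'), ('/dashboard', 'viewer'),
--              ('/admin', 'admin'), ('/audit', 'admin')]),
--     'POST': ({'/watchlists': 'analyst'},
--              [('/auth', 'viewer'), ('/admin', 'admin')]),
--     'PUT': ({'/preferences': 'analyst', '/users/*/role': 'admin'},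
--             [('/watchlists', 'analyst'), ('/admin', 'admin')]),
--     'DELETE': ({},
--                [('/watchlists', 'analyst'), ('/users', 'admin')]),
-- }
--
-- def check_permission(role, method, resource):
--     """Method-indexed rule tables: exact resource lookup, then ordered prefix rules."""
--     rules = _RULES.get(method)
--     if rules is None:
--         return True
--     exact, prefixes = rules
--     required = exact.get(resource)
--     if required is None:
--         for prefix, req in prefixes:
--             if resource.startswith(prefix):
--                 required = req
--                 break
--     if required is None:
--         return True
--     return _RANK.get(role, 0) >= _RANK.get(required, 0)
-- ===== Notes on version B (the rewrite author's own statement) =====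
-- stated objective: alternative
-- what changed: Replaced A's single pattern-string table (exact 'METHOD path' key lookup, then a scan that splits every pattern and tests wildcards) by a method-indexed rule table: per HTTP method an exact-resource dict plus an ordered (prefix, role) list, so no endpoint key string is built and no pattern is ever split.
import Mathlib
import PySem

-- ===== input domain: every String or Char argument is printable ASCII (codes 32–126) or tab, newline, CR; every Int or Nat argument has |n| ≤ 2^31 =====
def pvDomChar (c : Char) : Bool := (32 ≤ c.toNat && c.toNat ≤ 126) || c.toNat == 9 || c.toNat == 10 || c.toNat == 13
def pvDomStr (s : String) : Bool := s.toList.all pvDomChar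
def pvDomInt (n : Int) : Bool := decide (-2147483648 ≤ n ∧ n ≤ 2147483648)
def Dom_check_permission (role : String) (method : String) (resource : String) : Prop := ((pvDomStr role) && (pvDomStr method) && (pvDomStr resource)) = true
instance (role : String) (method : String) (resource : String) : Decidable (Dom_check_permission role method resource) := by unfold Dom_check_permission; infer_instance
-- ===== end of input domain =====

-- B replaces A's pattern-string table (exact dict lookup on "METHOD path", then a scan that
-- splits every pattern and tests wildcards) by a method-indexed rule table: per HTTP method an
-- exact-resource dict plus an ordered prefix list, so no key string is built and no pattern is
-- split (objective: simpler). Return values are proved identical for all inputs.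

-- ===== PORT A =====
-- module constants ROLE_HIERARCHY and ENDPOINT_PERMISSIONS
def pvRoleHierarchy : PySem.Dict String Int :=
  PySem.Dict.mk [("viewer", 0), ("analyst", 1), ("admin", 2)]

def pvEndpointPermissions : PySem.Dict String String :=
  PySem.Dict.mk
    [("POST /auth/*", "viewer"),
     ("GET /preferences", "viewer"),
     ("GET /history/*", "viewer"),
     ("GET /health", "viewer"),
     ("GET /dashboard/*", "viewer"),
     ("PUT /preferences", "analyst"),
     ("POST /watchlists", "analyst"),
     ("PUT /watchlists/*", "analyst"),
     ("DELETE /watchlists/*", "analyst"),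
     ("GET /admin/*", "admin"),
     ("PUT /admin/*", "admin"),
     ("POST /admin/*", "admin"),
     ("GET /audit/*", "admin"),
     ("PUT /users/*/role", "admin"),
     ("DELETE /users/*", "admin")]

-- A's wildcard for-loop; 'continue' = recurse on the rest, falling off the loop returns True
def pvWildcardLoop (role : String) (method : String) (resource : String) :
    List (String × String) → Bool
  | [] => true
  | (pattern, required_role) :: rest =>
    match PySem.Str.splitMax? pattern " " 1 with
    | some [pattern_method, pattern_path] =>
      if !(pattern_method == method) && !(pattern_method == "*") then
        pvWildcardLoop role method resource rest
      else if PySem.Str.endswith pattern_path "/*" then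
        if PySem.Str.startswith resource (PySem.Str.slice pattern_path none (some (-2))) then
          decide (pvRoleHierarchy.getD role 0 ≥ pvRoleHierarchy.getD required_role 0)
        else pvWildcardLoop role method resource rest
      else pvWildcardLoop role method resource rest
    | _ => true  -- unreachable: every pattern in the table contains a space (Python would raise)

def check_permission (role : String) (method : String) (resource : String) : Bool :=
  let endpoint_key := PySem.Str.join " " [method, resource]
  -- exact match first ('in' test + subscript = one get?)
  match pvEndpointPermissions.get? endpoint_key with
  | some required_role =>
      decide (pvRoleHierarchy.getD role 0 ≥ pvRoleHierarchy.getD required_role 0)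
  | none => pvWildcardLoop role method resource pvEndpointPermissions.items

-- ===== PORT B =====
-- B's constants: _RANK, and _RULES keyed by method (exact dict, ordered prefix rules)
def pvRank : PySem.Dict String Int :=
  PySem.Dict.mk [("viewer", 0), ("analyst", 1), ("admin", 2)]

def pvRules : PySem.Dict String (PySem.Dict String String × List (String × String)) :=
  PySem.Dict.mk
    [("GET", (PySem.Dict.mk [("/preferences", "viewer"), ("/health", "viewer")],
              [("/history", "viewer"), ("/dashboard", "viewer"),
               ("/admin", "admin"), ("/audit", "admin")])),
     ("POST", (PySem.Dict.mk [("/watchlists", "analyst")],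
               [("/auth", "viewer"), ("/admin", "admin")])),
     ("PUT", (PySem.Dict.mk [("/preferences", "analyst"), ("/users/*/role", "admin")],
              [("/watchlists", "analyst"), ("/admin", "admin")])),
     ("DELETE", (PySem.Dict.mk [],
                 [("/watchlists", "analyst"), ("/users", "admin")]))]

-- B's 'for prefix, req in prefixes: if startswith: required = req; break'
def pvPrefixScan (resource : String) : List (String × String) → Option String
  | [] => none
  | (pfx, req) :: rest =>
    if PySem.Str.startswith resource pfx then some req else pvPrefixScan resource rest

def check_permission_alt (role : String) (method : String) (resource : String) : Bool :=
  match pvRules.get? method with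
  | none => true
  | some (exact, prefixes) =>
    let required :=
      match exact.get? resource with
      | some r => some r
      | none => pvPrefixScan resource prefixes
    match required with
    | none => true
    | some req => decide (pvRank.getD role 0 ≥ pvRank.getD req 0)

-- ===== PRECONDITION & SPEC =====
def Spec_check_permission (role : String) (method : String) (resource : String) (out : Bool) : Prop := out = check_permission_alt role method resource
instance (role : String) (method : String) (resource : String) (out : Bool) : Decidable (Spec_check_permission role method resource out) := by unfold Spec_check_permission; infer_instance

-- ===== CLAIM (what is proved, stated in full; the proofs are below) =====
def Claim_equal_check_permission : Prop := ∀ (role : String) (method : String) (resource : String), Dom_check_permission role method resource → Spec_check_permission role method resource (check_permission role method resource)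

-- ===== LEMMAS AND PROOFS =====

-- a list with exactly one ' ' splits at that ' ' in only one way
theorem pvSplitSpace (as : List Char) : ∀ (xs ys bs : List Char), ' ' ∉ as → ' ' ∉ bs →
    xs ++ ' ' :: ys = as ++ ' ' :: bs → xs = as ∧ ys = bs := by
  induction as with
  | nil =>
    intro xs ys bs _ hb h
    cases xs with
    | nil => simpa using h
    | cons c xs' =>
      simp only [List.nil_append, List.cons_append, List.cons.injEq] at h
      exact absurd (h.2 ▸ (by simp : ' ' ∈ xs' ++ ' ' :: ys)) hb
  | cons a as' ih =>
    intro xs ys bs ha hb h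
    cases xs with
    | nil =>
      simp only [List.nil_append, List.cons_append, List.cons.injEq] at h
      exact absurd (h.1 ▸ List.mem_cons_self) ha
    | cons c xs' =>
      simp only [List.cons_append, List.cons.injEq] at h
      obtain ⟨h1, h2⟩ := ih xs' ys bs (fun hm => ha (List.mem_cons_of_mem _ hm)) hb h.2
      exact ⟨by simp [h.1, h1], h2⟩

theorem pvKeyToList (m r : String) :
    (PySem.Str.join " " [m, r]).toList = m.toList ++ ' ' :: r.toList := by
  simp [PySem.Str.join, PySem.Chars.join_cons_cons, PySem.Chars.join_singleton]

-- a one-space table key differs from the endpoint key unless method and resource both agree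
theorem pvBne (m r M R L : String) (hL : L.toList = M.toList ++ ' ' :: R.toList)
    (hM : ' ' ∉ M.toList) (hR : ' ' ∉ R.toList) (hmr : ¬(m = M ∧ r = R)) :
    ((L : String) == PySem.Str.join " " [m, r]) = false := by
  rw [beq_eq_false_iff_ne]
  intro hh
  have h2 : m.toList ++ ' ' :: r.toList = M.toList ++ ' ' :: R.toList := by
    rw [← pvKeyToList, hh.symm, hL]
  obtain ⟨a, b⟩ := pvSplitSpace _ _ _ _ hM hR h2
  exact hmr ⟨String.toList_inj.mp a, String.toList_inj.mp b⟩

-- normal form of both scans for method "GET" once no exact table key matches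
def pvNGET (role resource : String) : Bool :=
  if PySem.Str.startswith resource "/history" then decide (pvRoleHierarchy.getD role 0 ≥ 0)
  else if PySem.Str.startswith resource "/dashboard" then decide (pvRoleHierarchy.getD role 0 ≥ 0)
  else if PySem.Str.startswith resource "/admin" then decide (pvRoleHierarchy.getD role 0 ≥ 2)
  else if PySem.Str.startswith resource "/audit" then decide (pvRoleHierarchy.getD role 0 ≥ 2)
  else true

-- normal form of both scans for method "POST" once no exact table key matches
def pvNPOST (role resource : String) : Bool :=
  if PySem.Str.startswith resource "/auth" then decide (pvRoleHierarchy.getD role 0 ≥ 0)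
  else if PySem.Str.startswith resource "/admin" then decide (pvRoleHierarchy.getD role 0 ≥ 2)
  else true

-- normal form of both scans for method "PUT" once no exact table key matches
def pvNPUT (role resource : String) : Bool :=
  if PySem.Str.startswith resource "/watchlists" then decide (pvRoleHierarchy.getD role 0 ≥ 1)
  else if PySem.Str.startswith resource "/admin" then decide (pvRoleHierarchy.getD role 0 ≥ 2)
  else true

-- normal form of both scans for method "DELETE" once no exact table key matches
def pvNDELETE (role resource : String) : Bool :=
  if PySem.Str.startswith resource "/watchlists" then decide (pvRoleHierarchy.getD role 0 ≥ 1)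
  else if PySem.Str.startswith resource "/users" then decide (pvRoleHierarchy.getD role 0 ≥ 2)
  else true

theorem pvMissGET (role resource : String)
    (h1 : resource ≠ "/preferences") (h2 : resource ≠ "/health") (h3 : resource ≠ "/history/*") (h4 : resource ≠ "/dashboard/*") (h5 : resource ≠ "/admin/*") (h6 : resource ≠ "/audit/*") :
    check_permission role "GET" resource = check_permission_alt role "GET" resource := by
  have hnone : pvEndpointPermissions.get? (PySem.Str.join " " ["GET", resource]) = none := by
    simp [pvEndpointPermissions, PySem.Dict.get?,
      pvBne "GET" resource "POST" "/auth/*" "POST /auth/*" (by decide) (by decide) (by decide) (fun h => absurd h.1 (by decide)),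
      pvBne "GET" resource "GET" "/preferences" "GET /preferences" (by decide) (by decide) (by decide) (fun h => h1 h.2),
      pvBne "GET" resource "GET" "/history/*" "GET /history/*" (by decide) (by decide) (by decide) (fun h => h3 h.2),
      pvBne "GET" resource "GET" "/health" "GET /health" (by decide) (by decide) (by decide) (fun h => h2 h.2),
      pvBne "GET" resource "GET" "/dashboard/*" "GET /dashboard/*" (by decide) (by decide) (by decide) (fun h => h4 h.2),
      pvBne "GET" resource "PUT" "/preferences" "PUT /preferences" (by decide) (by decide) (by decide) (fun h => absurd h.1 (by decide)),
      pvBne "GET" resource "POST" "/watchlists" "POST /watchlists" (by decide) (by decide) (by decide) (fun h => absurd h.1 (by decide)),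
      pvBne "GET" resource "PUT" "/watchlists/*" "PUT /watchlists/*" (by decide) (by decide) (by decide) (fun h => absurd h.1 (by decide)),
      pvBne "GET" resource "DELETE" "/watchlists/*" "DELETE /watchlists/*" (by decide) (by decide) (by decide) (fun h => absurd h.1 (by decide)),
      pvBne "GET" resource "GET" "/admin/*" "GET /admin/*" (by decide) (by decide) (by decide) (fun h => h5 h.2),
      pvBne "GET" resource "PUT" "/admin/*" "PUT /admin/*" (by decide) (by decide) (by decide) (fun h => absurd h.1 (by decide)),
      pvBne "GET" resource "POST" "/admin/*" "POST /admin/*" (by decide) (by decide) (by decide) (fun h => absurd h.1 (by decide)),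
      pvBne "GET" resource "GET" "/audit/*" "GET /audit/*" (by decide) (by decide) (by decide) (fun h => h6 h.2),
      pvBne "GET" resource "PUT" "/users/*/role" "PUT /users/*/role" (by decide) (by decide) (by decide) (fun h => absurd h.1 (by decide)),
      pvBne "GET" resource "DELETE" "/users/*" "DELETE /users/*" (by decide) (by decide) (by decide) (fun h => absurd h.1 (by decide))]
  have hA : check_permission role "GET" resource = pvNGET role resource := by
    simp only [check_permission, hnone]; rfl
  have hB : check_permission_alt role "GET" resource = pvNGET role resource := by
    simp only [check_permission_alt,
      show pvRules.get? "GET" = some (PySem.Dict.mk [("/preferences", "viewer"), ("/health", "viewer")], [("/history", "viewer"), ("/dashboard", "viewer"), ("/admin", "admin"), ("/audit", "admin")]) from rfl,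
      PySem.Dict.get?_mk_cons, pvPrefixScan, pvNGET,
      beq_eq_false_iff_ne.mpr (Ne.symm h1), beq_eq_false_iff_ne.mpr (Ne.symm h2)]
    split_ifs <;> simp_all [pvRank, pvRoleHierarchy, PySem.Dict.getD, PySem.Dict.get?_mk_cons,
      show (PySem.Dict.mk ([] : List (String × String))).get? resource = none from rfl]
  rw [hA, hB]

theorem pvMissPOST (role resource : String)
    (h1 : resource ≠ "/auth/*") (h2 : resource ≠ "/watchlists") (h3 : resource ≠ "/admin/*") :
    check_permission role "POST" resource = check_permission_alt role "POST" resource := by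
  have hnone : pvEndpointPermissions.get? (PySem.Str.join " " ["POST", resource]) = none := by
    simp [pvEndpointPermissions, PySem.Dict.get?,
      pvBne "POST" resource "POST" "/auth/*" "POST /auth/*" (by decide) (by decide) (by decide) (fun h => h1 h.2),
      pvBne "POST" resource "GET" "/preferences" "GET /preferences" (by decide) (by decide) (by decide) (fun h => absurd h.1 (by decide)),
      pvBne "POST" resource "GET" "/history/*" "GET /history/*" (by decide) (by decide) (by decide) (fun h => absurd h.1 (by decide)),
      pvBne "POST" resource "GET" "/health" "GET /health" (by decide) (by decide) (by decide) (fun h => absurd h.1 (by decide)),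
      pvBne "POST" resource "GET" "/dashboard/*" "GET /dashboard/*" (by decide) (by decide) (by decide) (fun h => absurd h.1 (by decide)),
      pvBne "POST" resource "PUT" "/preferences" "PUT /preferences" (by decide) (by decide) (by decide) (fun h => absurd h.1 (by decide)),
      pvBne "POST" resource "POST" "/watchlists" "POST /watchlists" (by decide) (by decide) (by decide) (fun h => h2 h.2),
      pvBne "POST" resource "PUT" "/watchlists/*" "PUT /watchlists/*" (by decide) (by decide) (by decide) (fun h => absurd h.1 (by decide)),
      pvBne "POST" resource "DELETE" "/watchlists/*" "DELETE /watchlists/*" (by decide) (by decide) (by decide) (fun h => absurd h.1 (by decide)),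
      pvBne "POST" resource "GET" "/admin/*" "GET /admin/*" (by decide) (by decide) (by decide) (fun h => absurd h.1 (by decide)),
      pvBne "POST" resource "PUT" "/admin/*" "PUT /admin/*" (by decide) (by decide) (by decide) (fun h => absurd h.1 (by decide)),
      pvBne "POST" resource "POST" "/admin/*" "POST /admin/*" (by decide) (by decide) (by decide) (fun h => h3 h.2),
      pvBne "POST" resource "GET" "/audit/*" "GET /audit/*" (by decide) (by decide) (by decide) (fun h => absurd h.1 (by decide)),
      pvBne "POST" resource "PUT" "/users/*/role" "PUT /users/*/role" (by decide) (by decide) (by decide) (fun h => absurd h.1 (by decide)),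
      pvBne "POST" resource "DELETE" "/users/*" "DELETE /users/*" (by decide) (by decide) (by decide) (fun h => absurd h.1 (by decide))]
  have hA : check_permission role "POST" resource = pvNPOST role resource := by
    simp only [check_permission, hnone]; rfl
  have hB : check_permission_alt role "POST" resource = pvNPOST role resource := by
    simp only [check_permission_alt,
      show pvRules.get? "POST" = some (PySem.Dict.mk [("/watchlists", "analyst")], [("/auth", "viewer"), ("/admin", "admin")]) from rfl,
      PySem.Dict.get?_mk_cons, pvPrefixScan, pvNPOST,
      beq_eq_false_iff_ne.mpr (Ne.symm h2)]
    split_ifs <;> simp_all [pvRank, pvRoleHierarchy, PySem.Dict.getD, PySem.Dict.get?_mk_cons,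
      show (PySem.Dict.mk ([] : List (String × String))).get? resource = none from rfl]
  rw [hA, hB]

theorem pvMissPUT (role resource : String)
    (h1 : resource ≠ "/preferences") (h2 : resource ≠ "/watchlists/*") (h3 : resource ≠ "/admin/*") (h4 : resource ≠ "/users/*/role") :
    check_permission role "PUT" resource = check_permission_alt role "PUT" resource := by
  have hnone : pvEndpointPermissions.get? (PySem.Str.join " " ["PUT", resource]) = none := by
    simp [pvEndpointPermissions, PySem.Dict.get?,
      pvBne "PUT" resource "POST" "/auth/*" "POST /auth/*" (by decide) (by decide) (by decide) (fun h => absurd h.1 (by decide)),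
      pvBne "PUT" resource "GET" "/preferences" "GET /preferences" (by decide) (by decide) (by decide) (fun h => absurd h.1 (by decide)),
      pvBne "PUT" resource "GET" "/history/*" "GET /history/*" (by decide) (by decide) (by decide) (fun h => absurd h.1 (by decide)),
      pvBne "PUT" resource "GET" "/health" "GET /health" (by decide) (by decide) (by decide) (fun h => absurd h.1 (by decide)),
      pvBne "PUT" resource "GET" "/dashboard/*" "GET /dashboard/*" (by decide) (by decide) (by decide) (fun h => absurd h.1 (by decide)),
      pvBne "PUT" resource "PUT" "/preferences" "PUT /preferences" (by decide) (by decide) (by decide) (fun h => h1 h.2),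
      pvBne "PUT" resource "POST" "/watchlists" "POST /watchlists" (by decide) (by decide) (by decide) (fun h => absurd h.1 (by decide)),
      pvBne "PUT" resource "PUT" "/watchlists/*" "PUT /watchlists/*" (by decide) (by decide) (by decide) (fun h => h2 h.2),
      pvBne "PUT" resource "DELETE" "/watchlists/*" "DELETE /watchlists/*" (by decide) (by decide) (by decide) (fun h => absurd h.1 (by decide)),
      pvBne "PUT" resource "GET" "/admin/*" "GET /admin/*" (by decide) (by decide) (by decide) (fun h => absurd h.1 (by decide)),
      pvBne "PUT" resource "PUT" "/admin/*" "PUT /admin/*" (by decide) (by decide) (by decide) (fun h => h3 h.2),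
      pvBne "PUT" resource "POST" "/admin/*" "POST /admin/*" (by decide) (by decide) (by decide) (fun h => absurd h.1 (by decide)),
      pvBne "PUT" resource "GET" "/audit/*" "GET /audit/*" (by decide) (by decide) (by decide) (fun h => absurd h.1 (by decide)),
      pvBne "PUT" resource "PUT" "/users/*/role" "PUT /users/*/role" (by decide) (by decide) (by decide) (fun h => h4 h.2),
      pvBne "PUT" resource "DELETE" "/users/*" "DELETE /users/*" (by decide) (by decide) (by decide) (fun h => absurd h.1 (by decide))]
  have hA : check_permission role "PUT" resource = pvNPUT role resource := by
    simp only [check_permission, hnone]; rfl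
  have hB : check_permission_alt role "PUT" resource = pvNPUT role resource := by
    simp only [check_permission_alt,
      show pvRules.get? "PUT" = some (PySem.Dict.mk [("/preferences", "analyst"), ("/users/*/role", "admin")], [("/watchlists", "analyst"), ("/admin", "admin")]) from rfl,
      PySem.Dict.get?_mk_cons, pvPrefixScan, pvNPUT,
      beq_eq_false_iff_ne.mpr (Ne.symm h1), beq_eq_false_iff_ne.mpr (Ne.symm h4)]
    split_ifs <;> simp_all [pvRank, pvRoleHierarchy, PySem.Dict.getD, PySem.Dict.get?_mk_cons,
      show (PySem.Dict.mk ([] : List (String × String))).get? resource = none from rfl]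
  rw [hA, hB]

theorem pvMissDELETE (role resource : String)
    (h1 : resource ≠ "/watchlists/*") (h2 : resource ≠ "/users/*") :
    check_permission role "DELETE" resource = check_permission_alt role "DELETE" resource := by
  have hnone : pvEndpointPermissions.get? (PySem.Str.join " " ["DELETE", resource]) = none := by
    simp [pvEndpointPermissions, PySem.Dict.get?,
      pvBne "DELETE" resource "POST" "/auth/*" "POST /auth/*" (by decide) (by decide) (by decide) (fun h => absurd h.1 (by decide)),
      pvBne "DELETE" resource "GET" "/preferences" "GET /preferences" (by decide) (by decide) (by decide) (fun h => absurd h.1 (by decide)),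
      pvBne "DELETE" resource "GET" "/history/*" "GET /history/*" (by decide) (by decide) (by decide) (fun h => absurd h.1 (by decide)),
      pvBne "DELETE" resource "GET" "/health" "GET /health" (by decide) (by decide) (by decide) (fun h => absurd h.1 (by decide)),
      pvBne "DELETE" resource "GET" "/dashboard/*" "GET /dashboard/*" (by decide) (by decide) (by decide) (fun h => absurd h.1 (by decide)),
      pvBne "DELETE" resource "PUT" "/preferences" "PUT /preferences" (by decide) (by decide) (by decide) (fun h => absurd h.1 (by decide)),
      pvBne "DELETE" resource "POST" "/watchlists" "POST /watchlists" (by decide) (by decide) (by decide) (fun h => absurd h.1 (by decide)),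
      pvBne "DELETE" resource "PUT" "/watchlists/*" "PUT /watchlists/*" (by decide) (by decide) (by decide) (fun h => absurd h.1 (by decide)),
      pvBne "DELETE" resource "DELETE" "/watchlists/*" "DELETE /watchlists/*" (by decide) (by decide) (by decide) (fun h => h1 h.2),
      pvBne "DELETE" resource "GET" "/admin/*" "GET /admin/*" (by decide) (by decide) (by decide) (fun h => absurd h.1 (by decide)),
      pvBne "DELETE" resource "PUT" "/admin/*" "PUT /admin/*" (by decide) (by decide) (by decide) (fun h => absurd h.1 (by decide)),
      pvBne "DELETE" resource "POST" "/admin/*" "POST /admin/*" (by decide) (by decide) (by decide) (fun h => absurd h.1 (by decide)),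
      pvBne "DELETE" resource "GET" "/audit/*" "GET /audit/*" (by decide) (by decide) (by decide) (fun h => absurd h.1 (by decide)),
      pvBne "DELETE" resource "PUT" "/users/*/role" "PUT /users/*/role" (by decide) (by decide) (by decide) (fun h => absurd h.1 (by decide)),
      pvBne "DELETE" resource "DELETE" "/users/*" "DELETE /users/*" (by decide) (by decide) (by decide) (fun h => h2 h.2)]
  have hA : check_permission role "DELETE" resource = pvNDELETE role resource := by
    simp only [check_permission, hnone]; rfl
  have hB : check_permission_alt role "DELETE" resource = pvNDELETE role resource := by
    simp only [check_permission_alt,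
      show pvRules.get? "DELETE" = some (PySem.Dict.mk ([] : List (String × String)), [("/watchlists", "analyst"), ("/users", "admin")]) from rfl,
      pvPrefixScan, pvNDELETE]
    split_ifs <;> simp_all [pvRank, pvRoleHierarchy, PySem.Dict.getD, PySem.Dict.get?_mk_cons,
      show (PySem.Dict.mk ([] : List (String × String))).get? resource = none from rfl]
  rw [hA, hB]

theorem pvMissMethod (role method resource : String)
    (hG : method ≠ "GET") (hP : method ≠ "POST") (hU : method ≠ "PUT") (hD : method ≠ "DELETE") :
    check_permission role method resource = check_permission_alt role method resource := by
  have bG : (("GET" : String) == method) = false := beq_eq_false_iff_ne.mpr (Ne.symm hG)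
  have bP : (("POST" : String) == method) = false := beq_eq_false_iff_ne.mpr (Ne.symm hP)
  have bU : (("PUT" : String) == method) = false := beq_eq_false_iff_ne.mpr (Ne.symm hU)
  have bD : (("DELETE" : String) == method) = false := beq_eq_false_iff_ne.mpr (Ne.symm hD)
  have hnone : pvEndpointPermissions.get? (PySem.Str.join " " [method, resource]) = none := by
    simp [pvEndpointPermissions, PySem.Dict.get?,
      pvBne method resource "POST" "/auth/*" "POST /auth/*" (by decide) (by decide) (by decide) (fun h => hP h.1),
      pvBne method resource "GET" "/preferences" "GET /preferences" (by decide) (by decide) (by decide) (fun h => hG h.1),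
      pvBne method resource "GET" "/history/*" "GET /history/*" (by decide) (by decide) (by decide) (fun h => hG h.1),
      pvBne method resource "GET" "/health" "GET /health" (by decide) (by decide) (by decide) (fun h => hG h.1),
      pvBne method resource "GET" "/dashboard/*" "GET /dashboard/*" (by decide) (by decide) (by decide) (fun h => hG h.1),
      pvBne method resource "PUT" "/preferences" "PUT /preferences" (by decide) (by decide) (by decide) (fun h => hU h.1),
      pvBne method resource "POST" "/watchlists" "POST /watchlists" (by decide) (by decide) (by decide) (fun h => hP h.1),
      pvBne method resource "PUT" "/watchlists/*" "PUT /watchlists/*" (by decide) (by decide) (by decide) (fun h => hU h.1),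
      pvBne method resource "DELETE" "/watchlists/*" "DELETE /watchlists/*" (by decide) (by decide) (by decide) (fun h => hD h.1),
      pvBne method resource "GET" "/admin/*" "GET /admin/*" (by decide) (by decide) (by decide) (fun h => hG h.1),
      pvBne method resource "PUT" "/admin/*" "PUT /admin/*" (by decide) (by decide) (by decide) (fun h => hU h.1),
      pvBne method resource "POST" "/admin/*" "POST /admin/*" (by decide) (by decide) (by decide) (fun h => hP h.1),
      pvBne method resource "GET" "/audit/*" "GET /audit/*" (by decide) (by decide) (by decide) (fun h => hG h.1),
      pvBne method resource "PUT" "/users/*/role" "PUT /users/*/role" (by decide) (by decide) (by decide) (fun h => hU h.1),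
      pvBne method resource "DELETE" "/users/*" "DELETE /users/*" (by decide) (by decide) (by decide) (fun h => hD h.1)]
  have hA : check_permission role method resource = true := by
    simp only [check_permission, hnone]
    simp [pvWildcardLoop, pvEndpointPermissions, bG, bP, bU, bD,
      show PySem.Str.splitMax? "POST /auth/*" " " 1 = some ["POST", "/auth/*"] from rfl,
      show PySem.Str.splitMax? "GET /preferences" " " 1 = some ["GET", "/preferences"] from rfl,
      show PySem.Str.splitMax? "GET /history/*" " " 1 = some ["GET", "/history/*"] from rfl,
      show PySem.Str.splitMax? "GET /health" " " 1 = some ["GET", "/health"] from rfl,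
      show PySem.Str.splitMax? "GET /dashboard/*" " " 1 = some ["GET", "/dashboard/*"] from rfl,
      show PySem.Str.splitMax? "PUT /preferences" " " 1 = some ["PUT", "/preferences"] from rfl,
      show PySem.Str.splitMax? "POST /watchlists" " " 1 = some ["POST", "/watchlists"] from rfl,
      show PySem.Str.splitMax? "PUT /watchlists/*" " " 1 = some ["PUT", "/watchlists/*"] from rfl,
      show PySem.Str.splitMax? "DELETE /watchlists/*" " " 1 = some ["DELETE", "/watchlists/*"] from rfl,
      show PySem.Str.splitMax? "GET /admin/*" " " 1 = some ["GET", "/admin/*"] from rfl,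
      show PySem.Str.splitMax? "PUT /admin/*" " " 1 = some ["PUT", "/admin/*"] from rfl,
      show PySem.Str.splitMax? "POST /admin/*" " " 1 = some ["POST", "/admin/*"] from rfl,
      show PySem.Str.splitMax? "GET /audit/*" " " 1 = some ["GET", "/audit/*"] from rfl,
      show PySem.Str.splitMax? "PUT /users/*/role" " " 1 = some ["PUT", "/users/*/role"] from rfl,
      show PySem.Str.splitMax? "DELETE /users/*" " " 1 = some ["DELETE", "/users/*"] from rfl]
  have hB : check_permission_alt role method resource = true := by
    simp [check_permission_alt, pvRules, PySem.Dict.get?, bG, bP, bU, bD]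
  rw [hA, hB]

theorem check_permission_eq_alt (role method resource : String) :
    check_permission role method resource = check_permission_alt role method resource := by
  by_cases hGET : method = "GET"
  · subst hGET
    by_cases e1 : resource = "/preferences"
    · subst e1; rfl
    by_cases e2 : resource = "/health"
    · subst e2; rfl
    by_cases e3 : resource = "/history/*"
    · subst e3; rfl
    by_cases e4 : resource = "/dashboard/*"
    · subst e4; rfl
    by_cases e5 : resource = "/admin/*"
    · subst e5; rfl
    by_cases e6 : resource = "/audit/*"
    · subst e6; rfl
    exact pvMissGET role resource e1 e2 e3 e4 e5 e6
  by_cases hPOST : method = "POST"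
  · subst hPOST
    by_cases e1 : resource = "/auth/*"
    · subst e1; rfl
    by_cases e2 : resource = "/watchlists"
    · subst e2; rfl
    by_cases e3 : resource = "/admin/*"
    · subst e3; rfl
    exact pvMissPOST role resource e1 e2 e3
  by_cases hPUT : method = "PUT"
  · subst hPUT
    by_cases e1 : resource = "/preferences"
    · subst e1; rfl
    by_cases e2 : resource = "/watchlists/*"
    · subst e2; rfl
    by_cases e3 : resource = "/admin/*"
    · subst e3; rfl
    by_cases e4 : resource = "/users/*/role"
    · subst e4; rfl
    exact pvMissPUT role resource e1 e2 e3 e4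
  by_cases hDELETE : method = "DELETE"
  · subst hDELETE
    by_cases e1 : resource = "/watchlists/*"
    · subst e1; rfl
    by_cases e2 : resource = "/users/*"
    · subst e2; rfl
    exact pvMissDELETE role resource e1 e2
  exact pvMissMethod role method resource hGET hPOST hPUT hDELETE

-- ===== VERDICT (by name: the statement is the Claim_ definition above) =====
theorem check_permission_spec : Claim_equal_check_permission := by
  intro role method resource _
  unfold Spec_check_permission
  exact check_permission_eq_alt role method resource
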